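-- pv_equiv track=rewrite | github.com/georgeorellanasv/zendesk-sideconv-analytics | src/classifier.py | classify_recipient_type
-- ===== SOURCE A (Python) =====
-- RIA_DOMAINS: frozenset[str] = frozenset(
--     {
--         "riamoneytransfer.com",
--         "riafinancial.com",
--         "dandelionpayments.com",
--         "euronet.com",
--         "euronetsystems.com",
--     }
-- )
--
-- FREE_EMAIL_DOMAINS: frozenset[str] = frozenset(
--     {
--         "gmail.com",
--         "yahoo.com",
--         "yahoo.es",
--         "yahoo.com.mx",
--         "yahoo.com.ar",
--         "hotmail.com",
--         "hotmail.es",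
--         "hotmail.com.mx",
--         "outlook.com",
--         "outlook.es",
--         "live.com",
--         "live.com.mx",
--         "icloud.com",
--         "me.com",
--         "msn.com",
--         "aol.com",
--         "protonmail.com",
--         "proton.me",
--     }
-- )
--
-- def _domain(email: str) -> str:
--     """Return lowercase domain from an email address, or '' if not parseable."""
--     email = (email or "").strip().lower()
--     if "@" in email:
--         return email.split("@", 1)[1]
--     return ""
--
-- def _is_ria(email: str) -> bool:
--     return _domain(email) in RIA_DOMAINS
--
-- def _is_client(email: str) -> bool:
--     return _domain(email) in FREE_EMAIL_DOMAINS
--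
-- def classify_recipient_type(to_emails: list[str]) -> str:
--     """
--     Determine the type of recipient(s) in a side conversation.
--
--     Priority: if ANY recipient is a client → client
--               elif ANY is external correspondent → correspondent
--               elif ALL are Ria → internal
--               else → unknown
--     """
--     if not to_emails:
--         return "unknown"
--
--     has_client = any(_is_client(e) for e in to_emails if e)
--     has_external = any(not _is_ria(e) and not _is_client(e) for e in to_emails if e)
--     all_ria = all(_is_ria(e) for e in to_emails if e)
--
--     if has_client:
--         return "client"
--     if has_external:
--         return "correspondent"
--     if all_ria:
--         return "internal"
--     return "unknown"
-- ===== SOURCE B (Python) =====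
-- RIA_DOMAINS = frozenset(
--     {
--         "riamoneytransfer.com",
--         "riafinancial.com",
--         "dandelionpayments.com",
--         "euronet.com",
--         "euronetsystems.com",
--     }
-- )
--
-- FREE_EMAIL_DOMAINS = frozenset(
--     {
--         "gmail.com",
--         "yahoo.com",
--         "yahoo.es",
--         "yahoo.com.mx",
--         "yahoo.com.ar",
--         "hotmail.com",
--         "hotmail.es",
--         "hotmail.com.mx",
--         "outlook.com",
--         "outlook.es",
--         "live.com",
--         "live.com.mx",
--         "icloud.com",
--         "me.com",
--         "msn.com",
--         "aol.com",
--         "protonmail.com",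
--         "proton.me",
--     }
-- )
--
--
-- def _dom(email):
--     e = email.strip().lower()
--     return e.split("@", 1)[1] if "@" in e else ""
--
--
-- def classify_recipient_type(to_emails):
--     if not to_emails:
--         return "unknown"
--     has_client = False
--     has_external = False
--     all_ria = True
--     for e in to_emails:
--         if not e:
--             continue
--         d = _dom(e)
--         if d in FREE_EMAIL_DOMAINS:
--             has_client = True
--         elif d in RIA_DOMAINS:
--             pass
--         else:
--             has_external = True
--         if d not in RIA_DOMAINS:
--             all_ria = False
--     if has_client:
--         return "client"
--     if has_external:
--         return "correspondent"
--     if all_ria: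
--         return "internal"
--     return "unknown"
-- ===== Notes on version B (the rewrite author's own statement) =====
-- stated objective: alternative
-- what changed: Replaces the three separate any/any/all generator passes (each re-deriving the domain per email) with one fold over to_emails maintaining has_client/has_external/all_ria flags, computing each email's domain once.
import Mathlib
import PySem

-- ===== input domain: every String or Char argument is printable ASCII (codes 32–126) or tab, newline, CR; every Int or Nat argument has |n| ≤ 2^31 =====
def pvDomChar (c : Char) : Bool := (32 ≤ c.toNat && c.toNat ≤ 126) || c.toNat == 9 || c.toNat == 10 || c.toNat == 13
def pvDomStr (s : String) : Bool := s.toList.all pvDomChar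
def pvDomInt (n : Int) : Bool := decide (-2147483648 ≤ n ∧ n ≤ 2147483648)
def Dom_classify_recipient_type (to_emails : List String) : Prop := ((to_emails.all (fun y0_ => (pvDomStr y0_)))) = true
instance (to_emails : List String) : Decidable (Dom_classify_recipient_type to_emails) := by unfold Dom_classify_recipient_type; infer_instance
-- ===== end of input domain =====

-- B replaces A's three any/any/all passes by a single fold maintaining the three flags
-- (objective: alternative decomposition, single traversal; same cost class).

-- ===== PORT A =====
def pvRIA : List String :=
  ["riamoneytransfer.com", "riafinancial.com", "dandelionpayments.com",
   "euronet.com", "euronetsystems.com"]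

def pvFREE : List String :=
  ["gmail.com", "yahoo.com", "yahoo.es", "yahoo.com.mx", "yahoo.com.ar",
   "hotmail.com", "hotmail.es", "hotmail.com.mx", "outlook.com", "outlook.es",
   "live.com", "live.com.mx", "icloud.com", "me.com", "msn.com", "aol.com",
   "protonmail.com", "proton.me"]

-- _domain: (email or "").strip().lower(); split("@",1)[1] if "@" present else ""
def emailDomainA (email : String) : String :=
  let e := PySem.Str.lower (PySem.Str.strip (if email = "" then "" else email))
  if PySem.Str.isIn "@" e then ((PySem.Str.splitMax? e "@" 1).getD []).getD 1 ""
  else ""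

def pvIsRia (email : String) : Bool := pvRIA.contains (emailDomainA email)
def pvIsClient (email : String) : Bool := pvFREE.contains (emailDomainA email)

def classify_recipient_type (to_emails : List String) : String :=
  if to_emails = [] then "unknown"
  else
    let has_client := (to_emails.filter (fun e => e ≠ "")).any pvIsClient
    let has_external :=
      (to_emails.filter (fun e => e ≠ "")).any (fun e => !pvIsRia e && !pvIsClient e)
    let all_ria := (to_emails.filter (fun e => e ≠ "")).all pvIsRia
    if has_client then "client"
    else if has_external then "correspondent"
    else if all_ria then "internal"
    else "unknown"

-- ===== PORT B =====
-- _dom: email.strip().lower(); split("@",1)[1] if "@" present else ""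
def emailDomB (email : String) : String :=
  let e := PySem.Str.lower (PySem.Str.strip email)
  if PySem.Str.isIn "@" e then ((PySem.Str.splitMax? e "@" 1).getD []).getD 1 ""
  else ""

-- loop body: state = (has_client, has_external, all_ria)
def pvStep (st : Bool × Bool × Bool) (e : String) : Bool × Bool × Bool :=
  if e = "" then st
  else
    let d := emailDomB e
    let st1 :=
      if pvFREE.contains d then (true, st.2.1, st.2.2)
      else if pvRIA.contains d then st
      else (st.1, true, st.2.2)
    if pvRIA.contains d then st1 else (st1.1, st1.2.1, false)

def classify_recipient_type_alt (to_emails : List String) : String :=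
  if to_emails = [] then "unknown"
  else
    let st := to_emails.foldl pvStep (false, false, true)
    if st.1 then "client"
    else if st.2.1 then "correspondent"
    else if st.2.2 then "internal"
    else "unknown"

-- ===== PRECONDITION & SPEC =====
def Spec_classify_recipient_type (to_emails : List String) (out : String) : Prop := out = classify_recipient_type_alt to_emails
instance (to_emails : List String) (out : String) : Decidable (Spec_classify_recipient_type to_emails out) := by unfold Spec_classify_recipient_type; infer_instance

-- ===== CLAIM (what is proved, stated in full; the proofs are below) =====
def Claim_equal_classify_recipient_type : Prop := ∀ (to_emails : List String), Dom_classify_recipient_type to_emails → Spec_classify_recipient_type to_emails (classify_recipient_type to_emails)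

-- ===== LEMMAS AND PROOFS =====

theorem emailDomB_eq (e : String) : emailDomB e = emailDomainA e := by
  unfold emailDomB emailDomainA
  by_cases h : e = "" <;> simp [h]

theorem pvStep_char (c x r : Bool) (e : String) :
    pvStep (c, x, r) e =
      (c || (e ≠ "" && pvIsClient e),
       x || (e ≠ "" && (!pvIsRia e && !pvIsClient e)),
       r && (e = "" || pvIsRia e)) := by
  unfold pvStep
  by_cases he : e = ""
  · simp [he]
  · simp only [he, if_false, emailDomB_eq]
    by_cases hf : emailDomainA e ∈ pvFREE <;>
      by_cases hr : emailDomainA e ∈ pvRIA <;>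
      simp [hf, hr, pvIsClient, pvIsRia, he]

theorem pvFold_char (l : List String) (c x r : Bool) :
    l.foldl pvStep (c, x, r) =
      (c || (l.filter (fun e => e ≠ "")).any pvIsClient,
       x || (l.filter (fun e => e ≠ "")).any (fun e => !pvIsRia e && !pvIsClient e),
       r && (l.filter (fun e => e ≠ "")).all pvIsRia) := by
  induction l generalizing c x r with
  | nil => simp
  | cons e t ih =>
    rw [List.foldl_cons, pvStep_char, ih]
    by_cases he : e = "" <;>
      simp [he, Bool.or_assoc, Bool.and_assoc]

-- ===== VERDICT (by name: the statement is the Claim_ definition above) =====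
theorem classify_recipient_type_spec : Claim_equal_classify_recipient_type := by
  intro to_emails _
  unfold Spec_classify_recipient_type classify_recipient_type classify_recipient_type_alt
  by_cases h : to_emails = []
  · simp [h]
  · simp only [h, if_false, pvFold_char, Bool.false_or, Bool.true_and]
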